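-- pv_equiv track=rewrite | github.com/hirokifukui/magic-square-proof | verify_lambda_parity.py | gen_D_values
-- ===== SOURCE A (Python) =====
-- def gen_D_values(primes, max_val=200):
--     """Generate all products of subsets of primes up to max_val."""
--     vals = {1}
--     for p in primes:
--         new = set()
--         for v in vals:
--             if v * p <= max_val:
--                 new.add(v * p)
--         vals |= new
--     return sorted(vals)
-- ===== SOURCE B (Python) =====
-- def gen_D_values(primes, max_val=200):
--     """Generate all products of subsets of primes up to max_val."""
--     # Maintain vals as a strictly increasing list; merge in each prime's new
--     # products instead of hashing into a set, so no final sort is needed.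
--     vals = [1]
--     for p in primes:
--         news = sorted({v * p for v in vals if v * p <= max_val})
--         merged = []
--         i = j = 0
--         while i < len(vals) and j < len(news):
--             a, b = vals[i], news[j]
--             if a < b:
--                 merged.append(a); i += 1
--             elif b < a:
--                 merged.append(b); j += 1
--             else:
--                 merged.append(a); i += 1; j += 1
--         merged.extend(vals[i:])
--         merged.extend(news[j:])
--         vals = merged
--     return vals
-- ===== Notes on version B (the rewrite author's own statement) =====
-- stated objective: alternative
-- what changed: B maintains the value set as a strictly increasing list and merges each prime's new products in with a two-pointer merge, instead of accumulating a hash set and sorting it once at the end.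
import Mathlib
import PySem

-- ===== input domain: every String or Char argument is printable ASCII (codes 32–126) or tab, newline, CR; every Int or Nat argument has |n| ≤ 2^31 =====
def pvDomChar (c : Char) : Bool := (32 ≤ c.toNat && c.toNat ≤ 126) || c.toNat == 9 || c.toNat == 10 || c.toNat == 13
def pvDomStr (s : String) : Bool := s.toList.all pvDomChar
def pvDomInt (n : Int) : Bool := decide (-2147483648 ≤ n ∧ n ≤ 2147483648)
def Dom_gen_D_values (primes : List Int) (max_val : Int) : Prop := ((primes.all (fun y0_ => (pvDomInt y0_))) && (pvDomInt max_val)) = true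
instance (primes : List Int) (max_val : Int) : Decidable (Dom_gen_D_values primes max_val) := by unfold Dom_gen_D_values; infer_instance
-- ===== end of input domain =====

-- B keeps the value set as a strictly increasing list and merges new products in,
-- instead of accumulating a hash set and sorting once at the end (objective: alternative).

-- ===== PORT A =====
def gen_D_values (primes : List Int) (max_val : Int) : List Int :=
  let vals := primes.foldl (fun vals p =>
      let new := vals.foldl
        (fun new v => if v * p ≤ max_val then PySem.Set.add new (v * p) else new)
        PySem.Set.empty
      PySem.Set.union vals new)
    (PySem.Set.ofList [1])
  PySem.List.sorted vals (fun x => x) false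

-- ===== PORT B =====
-- the two-pointer while loop of Source B, transcribed as recursion on the two lists
def pvMerge : List Int → List Int → List Int
  | [], ys => ys
  | x :: xs, [] => x :: xs
  | x :: xs, y :: ys =>
    if x < y then x :: pvMerge xs (y :: ys)
    else if y < x then y :: pvMerge (x :: xs) ys
    else x :: pvMerge xs ys

def gen_D_values_alt (primes : List Int) (max_val : Int) : List Int :=
  primes.foldl (fun vals p =>
    let news := PySem.List.sorted
      (PySem.Set.ofList ((vals.filter (fun v => decide (v * p ≤ max_val))).map (fun v => v * p)))
      (fun x => x) false
    pvMerge vals news) [1]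

-- ===== PRECONDITION & SPEC =====
def Spec_gen_D_values (primes : List Int) (max_val : Int) (out : List Int) : Prop := out = gen_D_values_alt primes max_val
instance (primes : List Int) (max_val : Int) (out : List Int) : Decidable (Spec_gen_D_values primes max_val out) := by unfold Spec_gen_D_values; infer_instance

-- ===== CLAIM (what is proved, stated in full; the proofs are below) =====
def Claim_equal_gen_D_values : Prop := ∀ (primes : List Int) (max_val : Int), Dom_gen_D_values primes max_val → Spec_gen_D_values primes max_val (gen_D_values primes max_val)

-- ===== LEMMAS AND PROOFS =====

theorem mem_pvMerge (xs ys : List Int) (x : Int) :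
    x ∈ pvMerge xs ys ↔ x ∈ xs ∨ x ∈ ys := by
  fun_induction pvMerge xs ys with
  | case1 => simp
  | case2 => simp
  | case3 a as b bs h ih => simp [ih]; tauto
  | case4 a as b bs h1 h2 ih => simp [ih]; tauto
  | case5 a as b bs h1 h2 ih =>
    have : a = b := le_antisymm (not_lt.mp h2) (not_lt.mp h1)
    simp [ih, this]; tauto

theorem pairwise_pvMerge (xs ys : List Int)
    (hx : xs.Pairwise (· < ·)) (hy : ys.Pairwise (· < ·)) :
    (pvMerge xs ys).Pairwise (· < ·) := by
  fun_induction pvMerge xs ys with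
  | case1 => exact hy
  | case2 => exact hx
  | case3 a as b bs h ih =>
    obtain ⟨ha, has⟩ := List.pairwise_cons.mp hx
    obtain ⟨hb, hbs⟩ := List.pairwise_cons.mp hy
    refine List.pairwise_cons.mpr ⟨?_, ih has hy⟩
    intro z hz
    rcases (mem_pvMerge _ _ _).mp hz with hzx | hzy
    · exact ha z hzx
    · rcases List.mem_cons.mp hzy with rfl | hzys
      · exact h
      · exact lt_trans h (hb z hzys)
  | case4 a as b bs h1 h2 ih =>
    obtain ⟨ha, has⟩ := List.pairwise_cons.mp hx
    obtain ⟨hb, hbs⟩ := List.pairwise_cons.mp hy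
    refine List.pairwise_cons.mpr ⟨?_, ih hx hbs⟩
    intro z hz
    rcases (mem_pvMerge _ _ _).mp hz with hzx | hzy
    · rcases List.mem_cons.mp hzx with rfl | hzas
      · exact h2
      · exact lt_trans h2 (ha z hzas)
    · exact hb z hzy
  | case5 a as b bs h1 h2 ih =>
    have hab : a = b := le_antisymm (not_lt.mp h2) (not_lt.mp h1)
    obtain ⟨ha, has⟩ := List.pairwise_cons.mp hx
    obtain ⟨hb, hbs⟩ := List.pairwise_cons.mp hy
    refine List.pairwise_cons.mpr ⟨?_, ih has hbs⟩
    intro z hz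
    rcases (mem_pvMerge _ _ _).mp hz with hzx | hzy
    · exact ha z hzx
    · exact hab ▸ hb z hzy

theorem mem_innerA (p max_val : Int) (l init : List Int) (x : Int) :
    x ∈ l.foldl
        (fun new v => if v * p ≤ max_val then PySem.Set.add new (v * p) else new) init ↔
      x ∈ init ∨ ∃ v ∈ l, v * p ≤ max_val ∧ x = v * p := by
  induction l generalizing init with
  | nil => simp
  | cons a l ih =>
    simp only [List.foldl_cons, ih]
    by_cases h : a * p ≤ max_val <;> simp [h, PySem.Set.mem_add] <;> tauto

theorem loop_inv (max_val : Int) (l SA BL : List Int)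
    (hnd : SA.Nodup) (hpw : BL.Pairwise (· < ·)) (hm : ∀ x, x ∈ BL ↔ x ∈ SA) :
    (l.foldl (fun vals p =>
        PySem.Set.union vals (vals.foldl
          (fun new v => if v * p ≤ max_val then PySem.Set.add new (v * p) else new)
          PySem.Set.empty)) SA).Nodup ∧
    (l.foldl (fun vals p =>
        pvMerge vals (PySem.List.sorted
          (PySem.Set.ofList ((vals.filter (fun v => decide (v * p ≤ max_val))).map (fun v => v * p)))
          (fun x => x) false)) BL).Pairwise (· < ·) ∧
    (∀ x, x ∈ l.foldl (fun vals p =>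
        pvMerge vals (PySem.List.sorted
          (PySem.Set.ofList ((vals.filter (fun v => decide (v * p ≤ max_val))).map (fun v => v * p)))
          (fun x => x) false)) BL ↔
      x ∈ l.foldl (fun vals p =>
        PySem.Set.union vals (vals.foldl
          (fun new v => if v * p ≤ max_val then PySem.Set.add new (v * p) else new)
          PySem.Set.empty)) SA) := by
  induction l generalizing SA BL with
  | nil => exact ⟨hnd, hpw, hm⟩
  | cons p l ih =>
    simp only [List.foldl_cons]
    apply ih
    · exact PySem.Set.nodup_union _ _ hnd
    · exact pairwise_pvMerge _ _ hpw (PySem.List.sorted_ofList_pairwise_lt _)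
    · intro x
      simp only [mem_pvMerge, PySem.List.mem_sorted, PySem.Set.mem_ofList,
        PySem.Set.mem_union, mem_innerA, List.mem_map, List.mem_filter,
        PySem.Set.empty, List.not_mem_nil, false_or, hm, decide_eq_true_eq]
      constructor
      · rintro (h | ⟨v, ⟨hv, hle⟩, rfl⟩)
        · exact Or.inl h
        · exact Or.inr ⟨v, hv, hle, rfl⟩
      · rintro (h | ⟨v, hv, hle, rfl⟩)
        · exact Or.inl h
        · exact Or.inr ⟨v, ⟨hv, hle⟩, rfl⟩

-- ===== VERDICT (by name: the statement is the Claim_ definition above) =====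
theorem gen_D_values_spec : Claim_equal_gen_D_values := by
  intro primes max_val _
  unfold Spec_gen_D_values gen_D_values gen_D_values_alt
  obtain ⟨hnd, hpw, hm⟩ := loop_inv max_val primes (PySem.Set.ofList [1]) [1]
    (PySem.Set.nodup_ofList _) (by simp) (by simp [PySem.Set.mem_ofList])
  apply PySem.List.sorted_eq_of_perm_of_pairwise_lt
  · exact (List.perm_ext_iff_of_nodup (hpw.imp ne_of_lt) hnd).mpr hm
  · exact hpw
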